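-- pv_equiv track=rewrite | github.com/antonkrupin/algorithms | 28_tasks/SherlockValidString.py | SherlockValidString
-- ===== SOURCE A (Python) =====
-- def SherlockValidString(string):
--     letters = {}
--     counter = 0
--     for x in range(len(string)):
--         letter = string[x]
--         counter += 1
--         for y in range(len(string)):
--             if(x != y):
--                 if(letter == string[y]):
--                     counter += 1
--         letters[letter] = counter
--         counter = 0
--
--     if(len(letters) == 1):
--         return True
--     else:
--         values = list(letters.values())
--         maxValue = max(letters.values())
--         minValue = min(letters.values())
--         if(maxValue == minValue):
--             return True
--         else:
--             if(abs(maxValue - minValue) == 1):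
--                 if(values.count(maxValue) == 1 or values.count(minValue) == 1):
--                     return True
--                 else:
--                     return False
--             else:
--                 return False
-- ===== SOURCE B (Python) =====
-- def SherlockValidString(string):
--     freq = {}
--     for ch in string:
--         freq[ch] = freq.get(ch, 0) + 1
--     hist = {}
--     for v in freq.values():
--         hist[v] = hist.get(v, 0) + 1
--     span = max(hist) - min(hist)
--     if span == 0:
--         return True
--     if span == 1:
--         return 1 in hist.values()
--     return False
-- ===== Notes on version B (the rewrite author's own statement) =====
-- stated objective: faster
-- what changed: Replaces A's O(n^2) nested per-position rescans and max/min/count over the raw value list by a single O(n) counting pass plus a frequency-of-frequencies histogram whose key span decides validity.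
import Mathlib
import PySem

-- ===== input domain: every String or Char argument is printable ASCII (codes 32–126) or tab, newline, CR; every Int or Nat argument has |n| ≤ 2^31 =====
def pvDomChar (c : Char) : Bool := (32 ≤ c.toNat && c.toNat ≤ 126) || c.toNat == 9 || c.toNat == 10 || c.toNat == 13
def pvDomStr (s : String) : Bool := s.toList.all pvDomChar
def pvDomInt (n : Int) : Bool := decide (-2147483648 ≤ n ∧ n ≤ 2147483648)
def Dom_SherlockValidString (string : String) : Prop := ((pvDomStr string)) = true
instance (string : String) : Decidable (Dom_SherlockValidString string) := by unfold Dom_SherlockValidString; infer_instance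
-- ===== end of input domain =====

-- B replaces A's O(n^2) per-position rescans by one counting pass plus a
-- frequency-of-frequencies histogram (objective: faster).

-- ===== PORT A =====
-- Python's `counter` is reset to 0 at the end of every outer iteration, so it
-- is 0 whenever an iteration begins; it is carried as a local value here.
def SherlockValidString (string : String) : Bool :=
  let s := string.toList
  let letters : PySem.Dict Char Int :=
    (PySem.List.pyRange 0 (PySem.List.len s) 1).foldl
      (fun letters x =>
        let letter := PySem.List.pyGetD s x ' '
        let counter : Int := 0 + 1
        let counter :=
          (PySem.List.pyRange 0 (PySem.List.len s) 1).foldl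
            (fun counter y =>
              if x ≠ y then
                if letter = PySem.List.pyGetD s y ' ' then counter + 1 else counter
              else counter)
            counter
        letters.insert letter counter)
      PySem.Dict.empty
  if letters.size = 1 then
    true
  else
    let values := letters.values
    match PySem.List.max? letters.values id, PySem.List.min? letters.values id with
    | some maxValue, some minValue =>
        if maxValue = minValue then true
        else
          if |maxValue - minValue| = 1 then
            if PySem.List.count values maxValue = 1 ∨ PySem.List.count values minValue = 1 then
              true
            else
              false
          else
            false
    | _, _ => false   -- Python raises ValueError (max of empty values); excluded by Pre_

-- ===== PORT B =====
def SherlockValidString_alt (string : String) : Bool :=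
  let freq : PySem.Dict Char Int :=
    string.toList.foldl (fun freq ch => freq.insert ch (freq.getD ch 0 + 1)) PySem.Dict.empty
  let hist : PySem.Dict Int Int :=
    freq.values.foldl (fun hist v => hist.insert v (hist.getD v 0 + 1)) PySem.Dict.empty
  match PySem.List.max? hist.keys id with
  | none => false   -- Python raises ValueError (max of empty hist); excluded by Pre_
  | some mx =>
      match PySem.List.min? hist.keys id with
      | none => false
      | some mn =>
          let span := mx - mn
          if span = 0 then true
          else if span = 1 then hist.values.contains 1
          else false

-- ===== PRECONDITION & SPEC =====
-- On the empty string both A (max of letters.values()) and B (max of hist) raise ValueError.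
def Pre_SherlockValidString (string : String) : Prop := string.toList ≠ []
instance (string : String) : Decidable (Pre_SherlockValidString string) := by
  unfold Pre_SherlockValidString; infer_instance

def pvWitness_SherlockValidString : String := "aabbc"

def Spec_SherlockValidString (string : String) (out : Bool) : Prop := out = SherlockValidString_alt string
instance (string : String) (out : Bool) : Decidable (Spec_SherlockValidString string out) := by unfold Spec_SherlockValidString; infer_instance

-- ===== CLAIM (what is proved, stated in full; the proofs are below) =====
def Claim_equal_SherlockValidString : Prop := ∀ (string : String), Dom_SherlockValidString string → Pre_SherlockValidString string → Spec_SherlockValidString string (SherlockValidString string)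

-- ===== LEMMAS AND PROOFS =====

lemma countP_ne_and (l : List Int) (a : Int) (P : Int → Prop) [DecidablePred P]
    (hnd : l.Nodup) (ha : a ∈ l) :
    List.countP (fun y => decide (a ≠ y ∧ P y)) l
      = List.countP (fun y => decide (P y)) l - (if P a then 1 else 0) := by
  obtain ⟨l1, l2, rfl⟩ := List.append_of_mem ha
  simp only [List.nodup_append, List.nodup_cons, List.mem_cons] at hnd
  obtain ⟨h1, ⟨ha2, h2⟩, hdisj⟩ := hnd
  have ha1 : a ∉ l1 := fun h => hdisj a h a (Or.inl rfl) rfl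
  have e1 : List.countP (fun y => decide (a ≠ y ∧ P y)) l1 = List.countP (fun y => decide (P y)) l1 := by
    apply List.countP_congr; intro y hy
    have : a ≠ y := fun h => ha1 (h ▸ hy)
    simp [this]
  have e2 : List.countP (fun y => decide (a ≠ y ∧ P y)) l2 = List.countP (fun y => decide (P y)) l2 := by
    apply List.countP_congr; intro y hy
    have : a ≠ y := fun h => ha2 (h ▸ hy)
    simp [this]
  rw [List.countP_append, List.countP_append, List.countP_cons, List.countP_cons, e1, e2]
  by_cases hPa : P a <;> simp [hPa]

lemma countP_eq_count (s : List Char) (c : Char) :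
    List.countP (fun y => decide (c = PySem.List.pyGetD s y ' '))
      (PySem.List.pyRange 0 (PySem.List.len s) 1) = s.count c := by
  have hmap := PySem.List.map_pyGetD_pyRange_zero (xs := s) (d := ' ')
  calc List.countP (fun y => decide (c = PySem.List.pyGetD s y ' '))
        (PySem.List.pyRange 0 (PySem.List.len s) 1)
      = List.countP ((fun ch => decide (c = ch)) ∘ (fun y => PySem.List.pyGetD s y ' '))
        (PySem.List.pyRange 0 (PySem.List.len s) 1) := rfl
    _ = List.countP (fun ch => decide (c = ch)) s := by rw [← List.countP_map, hmap]
    _ = s.count c := by simp [List.count, eq_comm, BEq.beq]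

lemma innerLoop_eq_count (s : List Char) (x : Int) (hx0 : 0 ≤ x) (hx : x < s.length) :
    (PySem.List.pyRange 0 (PySem.List.len s) 1).foldl
      (fun counter y =>
        if x ≠ y then
          if PySem.List.pyGetD s x ' ' = PySem.List.pyGetD s y ' ' then counter + 1 else counter
        else counter)
      (0 + 1)
    = (s.count (PySem.List.pyGetD s x ' ') : Int) := by
  have hbody : (fun (counter : Int) (y : Int) =>
        if x ≠ y then
          if PySem.List.pyGetD s x ' ' = PySem.List.pyGetD s y ' ' then counter + 1 else counter
        else counter)
      = fun counter y =>
        if x ≠ y ∧ PySem.List.pyGetD s x ' ' = PySem.List.pyGetD s y ' ' then counter + 1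
        else counter := by
    funext c y
    by_cases h1 : x = y <;> by_cases h2 : PySem.List.pyGetD s x ' ' = PySem.List.pyGetD s y ' ' <;>
      simp [h1, h2]
  rw [hbody, PySem.List.foldl_ite_add_one]
  have hmemx : x ∈ PySem.List.pyRange 0 (PySem.List.len s) 1 := by
    rw [PySem.List.mem_pyRange_one]
    simp [PySem.List.len_eq]
    omega
  have hnd : (PySem.List.pyRange 0 (PySem.List.len s) 1).Nodup := PySem.List.nodup_pyRange_one _ _
  have hcongr := countP_ne_and (PySem.List.pyRange 0 (PySem.List.len s) 1) x
    (fun y => PySem.List.pyGetD s x ' ' = PySem.List.pyGetD s y ' ') hnd hmemx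
  have hpos : 0 < s.count (PySem.List.pyGetD s x ' ') := by
    apply List.count_pos_iff.mpr
    apply PySem.List.pyGetD_mem
    constructor <;> omega
  rw [hcongr, countP_eq_count]
  simp only [List.count]
  simp
  simp only [List.count] at hpos
  omega

lemma getD_foldl_insert_const (l : List Char) (g : Char → Int) (d : PySem.Dict Char Int)
    (k : Char) (d0 : Int) :
    (l.foldl (fun d x => d.insert x (g x)) d).getD k d0 = if k ∈ l then g k else d.getD k d0 := by
  induction l generalizing d with
  | nil => simp
  | cons a t ih =>
      simp only [List.foldl_cons, ih, PySem.Dict.getD_insert, List.mem_cons]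
      by_cases hk : k ∈ t <;> by_cases hka : k = a <;> simp [hk, hka]

lemma lettersA_eq_counter (s : List Char) :
    (PySem.List.pyRange 0 (PySem.List.len s) 1).foldl
      (fun (letters : PySem.Dict Char Int) x =>
        letters.insert (PySem.List.pyGetD s x ' ')
          ((PySem.List.pyRange 0 (PySem.List.len s) 1).foldl
            (fun counter y =>
              if x ≠ y then
                if PySem.List.pyGetD s x ' ' = PySem.List.pyGetD s y ' ' then counter + 1
                else counter
              else counter)
            (0 + 1)))
      PySem.Dict.empty
    = PySem.Dict.counter s := by
  have h1 : (PySem.List.pyRange 0 (PySem.List.len s) 1).foldl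
      (fun (letters : PySem.Dict Char Int) x =>
        letters.insert (PySem.List.pyGetD s x ' ')
          ((PySem.List.pyRange 0 (PySem.List.len s) 1).foldl
            (fun counter y =>
              if x ≠ y then
                if PySem.List.pyGetD s x ' ' = PySem.List.pyGetD s y ' ' then counter + 1
                else counter
              else counter)
            (0 + 1)))
      PySem.Dict.empty
      = (PySem.List.pyRange 0 (PySem.List.len s) 1).foldl
        (fun (letters : PySem.Dict Char Int) x =>
          letters.insert (PySem.List.pyGetD s x ' ') ((s.count (PySem.List.pyGetD s x ' ') : Int)))
        PySem.Dict.empty := by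
    apply PySem.List.foldl_congr_mem
    intro acc x hx
    have hmem := (PySem.List.mem_pyRange_one).mp hx
    rw [PySem.List.len_eq] at hmem
    rw [innerLoop_eq_count s x hmem.1 (by exact_mod_cast hmem.2)]
  rw [h1, PySem.List.foldl_pyRange_zero_pyGetD s ' '
    (fun (d : PySem.Dict Char Int) ch => d.insert ch ((s.count ch : Int))) PySem.Dict.empty]
  apply PySem.Dict.ext
  rw [PySem.Dict.items_counter]
  rw [PySem.Dict.items_eq_map_keys _ (PySem.Dict.nodup_keys_foldl_insert s _ _ PySem.Dict.nodup_keys_empty) 0]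
  rw [PySem.Dict.keys_foldl_insert]
  rw [PySem.Dict.keys_empty, PySem.Set.update_nil_left]
  apply List.map_congr_left
  intro k hk
  rw [getD_foldl_insert_const]
  rw [PySem.Set.mem_ofList] at hk
  simp [hk]

lemma max?_cons_isSome (c : Int) (t : List Int) : (PySem.List.max? (c :: t) id).isSome := by
  induction t generalizing c with
  | nil => rfl
  | cons b r ih =>
      have h : PySem.List.max? (c :: b :: r) id = PySem.List.max? ((if c < b then b else c) :: r) id := by
        simp only [PySem.List.max?, List.foldl_cons, id_eq]
        by_cases hcb : c < b <;> simp [hcb]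
      rw [h]; exact ih _

lemma max?_isSome_of_ne_nil (l : List Int) (h : l ≠ []) : (PySem.List.max? l id).isSome := by
  cases l with
  | nil => exact absurd rfl h
  | cons c t => exact max?_cons_isSome c t

lemma min?_cons_isSome (c : Int) (t : List Int) : (PySem.List.min? (c :: t) id).isSome := by
  induction t generalizing c with
  | nil => rfl
  | cons b r ih =>
      have h : PySem.List.min? (c :: b :: r) id = PySem.List.min? ((if b < c then b else c) :: r) id := by
        simp only [PySem.List.min?, List.foldl_cons, id_eq]
        by_cases hcb : b < c <;> simp [hcb]
      rw [h]; exact ih _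

lemma min?_isSome_of_ne_nil (l : List Int) (h : l ≠ []) : (PySem.List.min? l id).isSome := by
  cases l with
  | nil => exact absurd rfl h
  | cons c t => exact min?_cons_isSome c t

lemma max?_eq_of_mem_iff (l l' : List Int) (h : ∀ x, x ∈ l ↔ x ∈ l') (hl : l ≠ []) (hl' : l' ≠ []) :
    PySem.List.max? l id = PySem.List.max? l' id := by
  obtain ⟨m, hm⟩ := Option.isSome_iff_exists.mp (max?_isSome_of_ne_nil l hl)
  obtain ⟨m', hm'⟩ := Option.isSome_iff_exists.mp (max?_isSome_of_ne_nil l' hl')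
  rw [hm, hm']
  have h1 : m ≤ m' := PySem.List.max?_isMax hm' m ((h m).mp (PySem.List.max?_mem hm))
  have h2 : m' ≤ m := PySem.List.max?_isMax hm m' ((h m').mpr (PySem.List.max?_mem hm'))
  exact congrArg some (le_antisymm h1 h2)

lemma min?_eq_of_mem_iff (l l' : List Int) (h : ∀ x, x ∈ l ↔ x ∈ l') (hl : l ≠ []) (hl' : l' ≠ []) :
    PySem.List.min? l id = PySem.List.min? l' id := by
  obtain ⟨m, hm⟩ := Option.isSome_iff_exists.mp (min?_isSome_of_ne_nil l hl)
  obtain ⟨m', hm'⟩ := Option.isSome_iff_exists.mp (min?_isSome_of_ne_nil l' hl')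
  rw [hm, hm']
  have h1 : m ≤ m' := PySem.List.min?_isMin hm m' ((h m').mpr (PySem.List.min?_mem hm'))
  have h2 : m' ≤ m := PySem.List.min?_isMin hm' m ((h m).mp (PySem.List.min?_mem hm))
  exact congrArg some (le_antisymm h1 h2)

lemma values_counter {α : Type} [BEq α] [LawfulBEq α] (l : List α) :
    (PySem.Dict.counter l).values = (PySem.Set.ofList l).map (fun k => ((l.count k : Int))) := by
  simp only [PySem.Dict.values, PySem.Dict.items_counter, List.map_map]
  rfl

lemma ofList_ne_nil {α : Type} [BEq α] [LawfulBEq α] (l : List α) (hl : l ≠ []) :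
    PySem.Set.ofList l ≠ [] := by
  intro h
  cases l with
  | nil => exact hl rfl
  | cons v vt =>
      have hv : v ∈ PySem.Set.ofList (v :: vt) := by
        rw [PySem.Set.mem_ofList]; exact List.mem_cons_self ..
      rw [h] at hv
      exact absurd hv (List.not_mem_nil)

-- ===== VERDICT (by name: the statement is the Claim_ definition above) =====
theorem SherlockValidString_spec : Claim_equal_SherlockValidString := by
  intro string hdom hpre
  unfold Pre_SherlockValidString at hpre
  unfold Spec_SherlockValidString SherlockValidString SherlockValidString_alt
  simp only [PySem.Dict.foldl_insert_getD_add_one_eq_counter]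
  rw [lettersA_eq_counter string.toList]
  set s := string.toList with hsdef
  have hvals : (PySem.Dict.counter s).values
      = (PySem.Set.ofList s).map (fun k => ((s.count k : Int))) := by
    simp only [PySem.Dict.values, PySem.Dict.items_counter, List.map_map]
    rfl
  have hvalsne : (PySem.Dict.counter s).values ≠ [] := by
    rw [hvals]
    intro h
    rw [List.map_eq_nil_iff] at h
    exact ofList_ne_nil s hpre h
  have hkeys : (PySem.Dict.counter (PySem.Dict.counter s).values).keys
      = PySem.Set.ofList (PySem.Dict.counter s).values := PySem.Dict.keys_counter _
  obtain ⟨mx, hmx⟩ := Option.isSome_iff_exists.mp (max?_isSome_of_ne_nil _ hvalsne)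
  obtain ⟨mn, hmn⟩ := Option.isSome_iff_exists.mp (min?_isSome_of_ne_nil _ hvalsne)
  have hmemiff : ∀ x, x ∈ PySem.Set.ofList (PySem.Dict.counter s).values
      ↔ x ∈ (PySem.Dict.counter s).values := fun x => PySem.Set.mem_ofList _ x
  have hmaxk : PySem.List.max? (PySem.Set.ofList (PySem.Dict.counter s).values) id = some mx := by
    rw [max?_eq_of_mem_iff _ _ hmemiff (ofList_ne_nil _ hvalsne) hvalsne]
    exact hmx
  have hmink : PySem.List.min? (PySem.Set.ofList (PySem.Dict.counter s).values) id = some mn := by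
    rw [min?_eq_of_mem_iff _ _ hmemiff (ofList_ne_nil _ hvalsne) hvalsne]
    exact hmn
  rw [hkeys, hmx, hmn, hmaxk, hmink]
  simp only []
  have hmxmem : mx ∈ (PySem.Dict.counter s).values := PySem.List.max?_mem hmx
  have hmnmem : mn ∈ (PySem.Dict.counter s).values := PySem.List.min?_mem hmn
  have hbounds : ∀ k ∈ (PySem.Dict.counter s).values, mn ≤ k ∧ k ≤ mx := fun k hk =>
    ⟨PySem.List.min?_isMin hmn k hk, PySem.List.max?_isMax hmx k hk⟩
  have hmnle : mn ≤ mx := (hbounds mx hmxmem).1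
  by_cases hsz : (PySem.Dict.counter s).size = 1
  · have hlen : (PySem.Set.ofList s).length = 1 := by
      simpa [PySem.Dict.size, PySem.Dict.items_counter] using hsz
    obtain ⟨k0, hk0⟩ := List.length_eq_one_iff.mp hlen
    have hv1 : (PySem.Dict.counter s).values = [(s.count k0 : Int)] := by
      rw [hvals, hk0]; rfl
    rw [hv1] at hmx hmn
    simp only [PySem.List.max?, PySem.List.min?, List.foldl_cons, List.foldl_nil] at hmx hmn
    have hmxmn : mx = mn := by
      rw [Option.some_inj] at hmx hmn
      rw [← hmx, ← hmn]
    simp [hsz, hmxmn]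
  · simp only [hsz, if_false]
    by_cases heq : mx = mn
    · simp [heq]
    · have hlt : mn < mx := lt_of_le_of_ne hmnle (Ne.symm heq)
      have hsub0 : ¬ (mx - mn = 0) := by omega
      by_cases hd : mx - mn = 1
      · have hcont : (1 : Int) ∈ (PySem.Dict.counter (PySem.Dict.counter s).values).values
            ↔ (PySem.List.count (PySem.Dict.counter s).values mx = 1
                ∨ PySem.List.count (PySem.Dict.counter s).values mn = 1) := by
          rw [values_counter, List.mem_map]
          constructor
          · rintro ⟨k, hk, hck⟩
            rw [PySem.Set.mem_ofList] at hk
            have hb := hbounds k hk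
            rw [PySem.List.count_eq, PySem.List.count_eq]
            by_cases hkmx : k = mx
            · left; subst hkmx; omega
            · right
              have hkmn : k = mn := by omega
              subst hkmn; omega
          · rintro (h | h)
            · exact ⟨mx, (PySem.Set.mem_ofList _ _).mpr hmxmem,
                by rw [PySem.List.count_eq] at h; exact_mod_cast h⟩
            · exact ⟨mn, (PySem.Set.mem_ofList _ _).mpr hmnmem,
                by rw [PySem.List.count_eq] at h; exact_mod_cast h⟩
        have habs : |mx - mn| = 1 := by rw [abs_of_nonneg (by omega)]; exact hd
        by_cases hp : (PySem.List.count (PySem.Dict.counter s).values mx = 1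
            ∨ PySem.List.count (PySem.Dict.counter s).values mn = 1)
        · have h1 : (1 : Int) ∈ (PySem.Dict.counter (PySem.Dict.counter s).values).values :=
            hcont.mpr hp
          rw [PySem.List.count_eq, PySem.List.count_eq] at hp
          rcases hp with h | h <;> simp [h, h1, hd]
        · have h1 : ¬ ((1 : Int) ∈ (PySem.Dict.counter (PySem.Dict.counter s).values).values) :=
            fun hh => hp (hcont.mp hh)
          rw [PySem.List.count_eq, PySem.List.count_eq] at hp
          push Not at hp
          simp [h1, hp.1, hp.2, heq, hd]
      · have habs : ¬ (|mx - mn| = 1) := by rw [abs_of_nonneg (by omega)]; exact hd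
        simp [heq, habs, hsub0, hd]
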